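-- pv_equiv track=rewrite | github.com/AramKoorn/AdventOfCode | 2024/day02/part2.py | find_save
-- ===== SOURCE A (Python) =====
-- def find_save(l):
--     idx = []
--     asc , desc = True, True
--     for i in range(1, len(l)):
--         diff = l[i] - l[i - 1]
--         if diff <= 0 or abs(diff) > 3:
--             idx.append(i)
--             asc = False
--         if diff >= 0 or abs(diff) > 3:
--             idx.append(i)
--             desc = False
--     return asc or desc, idx
-- ===== SOURCE B (Python) =====
-- def _merge(xs, ys):
--     """Merge two sorted lists (ties take from xs first)."""
--     out = []
--     a = b = 0
--     while a < len(xs) and b < len(ys):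
--         if xs[a] <= ys[b]:
--             out.append(xs[a])
--             a += 1
--         else:
--             out.append(ys[b])
--             b += 1
--     out.extend(xs[a:])
--     out.extend(ys[b:])
--     return out
--
--
-- def find_save(l):
--     d = [b - a for a, b in zip(l, l[1:])]
--     bad_asc = [i for i, x in enumerate(d, 1) if not 1 <= x <= 3]
--     bad_desc = [i for i, x in enumerate(d, 1) if not -3 <= x <= -1]
--     return not bad_asc or not bad_desc, _merge(bad_asc, bad_desc)
-- ===== Notes on version B (the rewrite author's own statement) =====
-- stated objective: alternative
-- what changed: Replaces the single fused loop with mutable asc/desc flags by precomputing the adjacent-difference list, filtering out the ascent-breaking and descent-breaking indices as two independent lists, and merging those two sorted lists; the safety flag falls out as emptiness of either list.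
import Mathlib
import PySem

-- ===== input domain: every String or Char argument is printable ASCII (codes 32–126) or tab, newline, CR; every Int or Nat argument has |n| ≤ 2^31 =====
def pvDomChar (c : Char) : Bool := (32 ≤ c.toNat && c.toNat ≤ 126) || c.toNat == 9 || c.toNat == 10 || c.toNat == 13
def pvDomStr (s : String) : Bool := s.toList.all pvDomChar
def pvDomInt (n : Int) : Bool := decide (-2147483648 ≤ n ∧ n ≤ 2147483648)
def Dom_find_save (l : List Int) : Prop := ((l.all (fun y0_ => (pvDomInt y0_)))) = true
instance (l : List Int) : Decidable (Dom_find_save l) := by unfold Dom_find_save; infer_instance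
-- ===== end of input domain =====

-- B replaces A's fused loop with mutable asc/desc flags by: precompute the diffs, filter the
-- ascent-breaking and descent-breaking indices as two lists, merge the two sorted lists
-- (alternative decomposition, same cost).

-- ===== PORT A =====
-- one pass over indices 1..len-1, state (idx, asc, desc)
def find_save (l : List Int) : Bool × List Int :=
  let st := (PySem.List.pyRange 1 (l.length : Int) 1).foldl
    (fun (st : List Int × Bool × Bool) i =>
      let diff := PySem.List.pyGetD l i 0 - PySem.List.pyGetD l (i - 1) 0
      let st1 := if diff ≤ 0 ∨ 3 < |diff| then (st.1 ++ [i], false, st.2.2) else st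
      if 0 ≤ diff ∨ 3 < |diff| then (st1.1 ++ [i], st1.2.1, false) else st1)
    ([], true, true)
  (st.2.1 || st.2.2, st.1)

-- ===== PORT B =====
-- two-pointer merge of two sorted lists, ties taken from the first (Source B's _merge);
-- the while loop consuming the fronts becomes recursion on the two suffixes with an out-accumulator
def pvMergeLoop : List Int → List Int → List Int → List Int
  | out, x :: xs, y :: ys =>
    if x ≤ y then pvMergeLoop (out ++ [x]) xs (y :: ys)
    else pvMergeLoop (out ++ [y]) (x :: xs) ys
  | out, xs, ys => out ++ xs ++ ys
termination_by _ xs ys => xs.length + ys.length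

-- diffs first, then the two filtered index lists, then their merge
def find_save_alt (l : List Int) : Bool × List Int :=
  let d := List.zipWith (fun a b => b - a) l l.tail
  let bad_asc := ((PySem.List.enumerate d 1).filter (fun p => !decide (1 ≤ p.2 ∧ p.2 ≤ 3))).map (·.1)
  let bad_desc := ((PySem.List.enumerate d 1).filter (fun p => !decide (-3 ≤ p.2 ∧ p.2 ≤ -1))).map (·.1)
  (bad_asc.isEmpty || bad_desc.isEmpty, pvMergeLoop [] bad_asc bad_desc)

-- ===== PRECONDITION & SPEC =====
def Spec_find_save (l : List Int) (out : Bool × List Int) : Prop := out = find_save_alt l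
instance (l : List Int) (out : Bool × List Int) : Decidable (Spec_find_save l out) := by unfold Spec_find_save; infer_instance

-- ===== CLAIM =====
def Claim_equal_find_save : Prop := ∀ (l : List Int), Dom_find_save l → Spec_find_save l (find_save l)

-- ===== LEMMAS AND PROOFS =====

-- A's loop body, viewed as a function of the pair (index, diff)
def pvStep (st : List Int × Bool × Bool) (p : Int × Int) : List Int × Bool × Bool :=
  let st1 := if p.2 ≤ 0 ∨ 3 < |p.2| then (st.1 ++ [p.1], false, st.2.2) else st
  if 0 ≤ p.2 ∨ 3 < |p.2| then (st1.1 ++ [p.1], st1.2.1, false) else st1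

-- the indices contributed at one pair, phrased with B's conditions
def pvRep (p : Int × Int) : List Int :=
  (if ¬ (1 ≤ p.2 ∧ p.2 ≤ 3) then [p.1] else []) ++ (if ¬ (-3 ≤ p.2 ∧ p.2 ≤ -1) then [p.1] else [])

-- B's two filtered index lists, parametric in the start index
def pvBad (f : Int → Bool) (d : List Int) (s : Int) : List Int :=
  ((PySem.List.enumerate d s).filter (fun p => f p.2)).map (·.1)

-- the (index, diff) pairs A's loop visits are exactly enumerate(diffs, 1)
lemma pvPairs (l : List Int) :
    (PySem.List.pyRange 1 (l.length : Int) 1).map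
      (fun i => (i, PySem.List.pyGetD l i 0 - PySem.List.pyGetD l (i - 1) 0))
    = PySem.List.enumerate (List.zipWith (fun a b => b - a) l l.tail) 1 := by
  apply List.ext_getElem
  · cases l <;> simp [PySem.List.length_pyRange_one, PySem.List.length_enumerate]
  · intro k hk hk'
    have hlen : k + 1 < l.length := by
      simp [PySem.List.length_pyRange_one] at hk; omega
    rw [List.getElem_map, PySem.List.getElem_pyRange_one, PySem.List.getElem_enumerate]
    have e1 : (1 + (k : Int)).toNat = k + 1 := by omega
    have e2 : (1 + (k : Int) - 1).toNat = k := by omega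
    rw [PySem.List.pyGetD_eq_getElem l 0 (by omega) (by omega),
        PySem.List.pyGetD_eq_getElem l 0 (by omega) (by omega)]
    refine Prod.ext (by ring) ?_
    simp only [e1, e2, List.getElem_zipWith, List.getElem_tail]

-- A's fused fold over enumerate(diffs, s) computes the interleaved index list and the two all-scans
lemma pvFold (d : List Int) (s : Int) (idx : List Int) (asc desc : Bool) :
    (PySem.List.enumerate d s).foldl pvStep (idx, asc, desc)
    = (idx ++ (PySem.List.enumerate d s).flatMap pvRep,
       asc && d.all (fun x => decide (1 ≤ x ∧ x ≤ 3)),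
       desc && d.all (fun x => decide (-3 ≤ x ∧ x ≤ -1))) := by
  induction d generalizing s idx asc desc with
  | nil => simp [PySem.List.enumerate]
  | cons x xs ih =>
    rw [PySem.List.enumerate_cons, List.foldl_cons, List.flatMap_cons]
    have habs : (3 < |x|) ↔ (3 < x ∨ x < -3) := by
      rw [lt_abs]; constructor <;> (intro h; omega)
    by_cases h1 : x ≤ 0 ∨ 3 < |x| <;> by_cases h2 : 0 ≤ x ∨ 3 < |x|
    · have ha : ¬ (1 ≤ x ∧ x ≤ 3) := by rw [habs] at h1; omega
      have hd : ¬ (-3 ≤ x ∧ x ≤ -1) := by rw [habs] at h2; omega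
      simp only [pvStep, pvRep, h1, h2, if_true, ih]
      simp [ha, hd]
    · have ha : ¬ (1 ≤ x ∧ x ≤ 3) := by rw [habs] at h1; omega
      have hd : (-3 ≤ x ∧ x ≤ -1) := by rw [habs] at h1 h2; omega
      simp only [pvStep, pvRep, h1, h2, if_true, if_false, ih]
      simp [ha, hd]
    · have ha : (1 ≤ x ∧ x ≤ 3) := by rw [habs] at h1 h2; omega
      have hd : ¬ (-3 ≤ x ∧ x ≤ -1) := by rw [habs] at h2; omega
      simp only [pvStep, pvRep, h1, h2, if_true, if_false, ih]
      simp [ha, hd]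
    · exfalso; rw [habs] at h1 h2; omega

-- every index in a filtered enumerate list is ≥ the start index
lemma pvBad_ge (f : Int → Bool) (d : List Int) (s : Int) :
    ∀ j ∈ pvBad f d s, s ≤ j := by
  intro j hj
  simp only [pvBad, List.mem_map, List.mem_filter] at hj
  obtain ⟨p, ⟨hp, _⟩, rfl⟩ := hj
  obtain ⟨k, hk, rfl⟩ := (PySem.List.mem_enumerate_iff _ _ _).1 hp
  simp only []
  omega

-- unfolding pvBad one step
lemma pvBad_cons (f : Int → Bool) (x : Int) (xs : List Int) (s : Int) :
    pvBad f (x :: xs) s = (if f x then [s] else []) ++ pvBad f xs (s + 1) := by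
  simp only [pvBad, PySem.List.enumerate_cons, List.filter_cons]
  by_cases h : f x <;> simp [h]

-- the merge, without the accumulator (proof-side view of pvMergeLoop)
def pvMerge : List Int → List Int → List Int
  | [], ys => ys
  | x :: xs, [] => x :: xs
  | x :: xs, y :: ys => if x ≤ y then x :: pvMerge xs (y :: ys) else y :: pvMerge (x :: xs) ys

lemma pvMergeLoop_eq (out xs ys : List Int) : pvMergeLoop out xs ys = out ++ pvMerge xs ys := by
  fun_induction pvMergeLoop out xs ys with
  | case1 out x xs y ys h ih => rw [ih]; simp [pvMerge, h]
  | case2 out x xs y ys h ih => rw [ih]; simp [pvMerge, h]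
  | case3 out xs ys h =>
    match xs, ys with
    | [], ys => cases ys <;> simp [pvMerge]
    | x :: xs, [] => simp [pvMerge]
    | x :: xs, y :: ys => exact absurd (h x xs y ys rfl rfl) (fun f => f)

lemma pvMerge_nil_left (ys : List Int) : pvMerge [] ys = ys := by
  cases ys <;> simp [pvMerge]

lemma pvMerge_nil_right (xs : List Int) : pvMerge xs [] = xs := by
  cases xs <;> simp [pvMerge]

lemma pvMerge_cons_left (s : Int) (xs ys : List Int) (h : ∀ y ∈ ys, s < y) :
    pvMerge (s :: xs) ys = s :: pvMerge xs ys := by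
  cases ys with
  | nil => rw [pvMerge_nil_right, pvMerge_nil_right]
  | cons y ys =>
    have : s ≤ y := le_of_lt (h y (by simp))
    simp [pvMerge, this]

lemma pvMerge_cons_right (s : Int) (xs ys : List Int) (h : ∀ x ∈ xs, s < x) :
    pvMerge xs (s :: ys) = s :: pvMerge xs ys := by
  cases xs with
  | nil => rw [pvMerge_nil_left, pvMerge_nil_left]
  | cons x xs =>
    have : ¬ x ≤ s := not_le.2 (h x (by simp))
    simp [pvMerge, this]

-- merging B's two filtered index lists reproduces A's interleaved list
lemma pvMergeBad (d : List Int) (s : Int) :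
    pvMerge (pvBad (fun x => !decide (1 ≤ x ∧ x ≤ 3)) d s)
            (pvBad (fun x => !decide (-3 ≤ x ∧ x ≤ -1)) d s)
    = (PySem.List.enumerate d s).flatMap pvRep := by
  induction d generalizing s with
  | nil => simp [pvBad, PySem.List.enumerate, pvMerge_nil_left]
  | cons x xs ih =>
    have hA' : ∀ j ∈ pvBad (fun x => !decide (1 ≤ x ∧ x ≤ 3)) xs (s + 1), s < j := by
      intro j hj; have := pvBad_ge _ xs (s + 1) j hj; omega
    have hD' : ∀ j ∈ pvBad (fun x => !decide (-3 ≤ x ∧ x ≤ -1)) xs (s + 1), s < j := by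
      intro j hj; have := pvBad_ge _ xs (s + 1) j hj; omega
    rw [pvBad_cons, pvBad_cons, PySem.List.enumerate_cons, List.flatMap_cons]
    by_cases ha : (1 ≤ x ∧ x ≤ 3) <;> by_cases hd : (-3 ≤ x ∧ x ≤ -1)
    · omega
    · rw [if_neg (by simp [ha]), if_pos (by simp [hd]), List.nil_append, List.singleton_append]
      rw [pvMerge_cons_right s _ _ hA', ih]
      simp [pvRep, ha, hd]
    · rw [if_pos (by simp [ha]), if_neg (by simp [hd]), List.singleton_append, List.nil_append]
      rw [pvMerge_cons_left s _ _ hD', ih]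
      simp [pvRep, ha, hd]
    · rw [if_pos (by simp [ha]), if_pos (by simp [hd]), List.singleton_append, List.singleton_append]
      have hstep : pvMerge (s :: pvBad (fun x => !decide (1 ≤ x ∧ x ≤ 3)) xs (s + 1))
          (s :: pvBad (fun x => !decide (-3 ≤ x ∧ x ≤ -1)) xs (s + 1))
          = s :: pvMerge (pvBad (fun x => !decide (1 ≤ x ∧ x ≤ 3)) xs (s + 1))
              (s :: pvBad (fun x => !decide (-3 ≤ x ∧ x ≤ -1)) xs (s + 1)) := by
        simp [pvMerge]
      rw [hstep, pvMerge_cons_right s _ _ hA', ih]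
      simp [pvRep, ha, hd]

-- a filtered enumerate list is empty exactly when every diff passes the test
lemma pvBad_isEmpty (g : Int → Bool) (d : List Int) (s : Int) :
    (pvBad (fun x => !g x) d s).isEmpty = d.all g := by
  induction d generalizing s with
  | nil => simp [pvBad, PySem.List.enumerate]
  | cons x xs ih =>
    simp only [pvBad, PySem.List.enumerate_cons, List.filter_cons, List.all_cons]
    by_cases h : g x
    · simp only [h, Bool.not_true, Bool.true_and]
      exact ih (s + 1)
    · simp [h]

-- ===== VERDICT =====
theorem find_save_spec : Claim_equal_find_save := by
  intro l _
  unfold Spec_find_save find_save find_save_alt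
  have hbody : (PySem.List.pyRange 1 (l.length : Int) 1).foldl
      (fun (st : List Int × Bool × Bool) i =>
        let diff := PySem.List.pyGetD l i 0 - PySem.List.pyGetD l (i - 1) 0
        let st1 := if diff ≤ 0 ∨ 3 < |diff| then (st.1 ++ [i], false, st.2.2) else st
        if 0 ≤ diff ∨ 3 < |diff| then (st1.1 ++ [i], st1.2.1, false) else st1)
      ([], true, true)
    = ((PySem.List.pyRange 1 (l.length : Int) 1).map
        (fun i => (i, PySem.List.pyGetD l i 0 - PySem.List.pyGetD l (i - 1) 0))).foldl
        pvStep ([], true, true) := by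
    rw [List.foldl_map]
    rfl
  rw [hbody, pvPairs, pvFold]
  have h1 := pvMergeBad (List.zipWith (fun a b => b - a) l l.tail) 1
  have h2 := pvBad_isEmpty (fun x => decide (1 ≤ x ∧ x ≤ 3)) (List.zipWith (fun a b => b - a) l l.tail) 1
  have h3 := pvBad_isEmpty (fun x => decide (-3 ≤ x ∧ x ≤ -1)) (List.zipWith (fun a b => b - a) l l.tail) 1
  simp only [pvBad] at h1 h2 h3
  simp only [List.nil_append, Bool.true_and, pvMergeLoop_eq, ← h1, h2, h3]
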